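-- pv_equiv track=rewrite | github.com/SagarDhok/CodeDaily | GeeksOfGeeks/day-75.py | chocolates
-- ===== SOURCE A (Python) =====
-- def chocolates(arr) :
--     start = 0
--     end = len(arr) - 1
--
--     while start < end:
--         if arr[start] > arr[end]:
--             start += 1
--         else:
--             end -= 1
--
--     return arr[start]
-- ===== SOURCE B (Python) =====
-- def chocolates(arr):
--     # Single forward scan for the minimum; arr[0] reproduces A's IndexError on [].
--     m = arr[0]
--     for x in arr:
--         if x < m:
--             m = x
--     return m
-- ===== Notes on version B (the rewrite author's own statement) =====
-- stated objective: simpler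
-- what changed: A's two-pointer inward scan always discards the larger endpoint, so it returns the minimum; B computes it by a single forward scan keeping the smallest element seen so far.
import Mathlib
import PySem

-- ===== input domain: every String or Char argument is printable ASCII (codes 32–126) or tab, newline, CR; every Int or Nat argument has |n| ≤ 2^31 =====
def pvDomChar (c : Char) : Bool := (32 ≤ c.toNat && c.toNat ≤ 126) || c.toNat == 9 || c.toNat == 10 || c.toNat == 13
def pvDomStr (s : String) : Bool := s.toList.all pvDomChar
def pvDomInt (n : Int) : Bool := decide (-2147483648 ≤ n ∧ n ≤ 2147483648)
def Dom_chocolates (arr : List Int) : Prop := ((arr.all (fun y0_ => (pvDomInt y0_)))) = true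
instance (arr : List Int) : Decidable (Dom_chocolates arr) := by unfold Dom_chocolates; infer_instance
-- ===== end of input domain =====

-- B replaces A's two-pointer inward scan by a single forward scan for the minimum (simpler).

-- ===== PORT A =====
-- while start < end: discard the larger endpoint; return arr[start].
-- fuel = end - start bounds the iteration count exactly (each step shrinks end - start by 1): a totality guard only.
def chocLoop (arr : List Int) (fuel : Nat) (s e : Int) : Int :=
  match fuel with
  | 0 => (PySem.List.pyGet? arr s).getD 0
  | n + 1 =>
    if s < e then
      if (PySem.List.pyGet? arr s).getD 0 > (PySem.List.pyGet? arr e).getD 0 then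
        chocLoop arr n (s + 1) e
      else
        chocLoop arr n s (e - 1)
    else
      (PySem.List.pyGet? arr s).getD 0

def chocolates (arr : List Int) : Int :=
  chocLoop arr (PySem.List.len arr - 1).toNat 0 (PySem.List.len arr - 1)

-- ===== PORT B =====
-- m = arr[0]; for x in arr: if x < m: m = x; return m
def chocolates_alt (arr : List Int) : Int :=
  arr.foldl (fun m x => if x < m then x else m)
    ((PySem.List.pyGet? arr 0).getD 0)

-- ===== PRECONDITION & SPEC =====
-- A (and B) raise IndexError on the empty list: excluded.
def Pre_chocolates (arr : List Int) : Prop := arr ≠ []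
instance (arr : List Int) : Decidable (Pre_chocolates arr) := by unfold Pre_chocolates; infer_instance
def pvWitness_chocolates : List Int := [3, 1, 2]

def Spec_chocolates (arr : List Int) (out : Int) : Prop := out = chocolates_alt arr
instance (arr : List Int) (out : Int) : Decidable (Spec_chocolates arr out) := by unfold Spec_chocolates; infer_instance

-- ===== CLAIM (what is proved, stated in full; the proofs are below) =====
def Claim_equal_chocolates : Prop := ∀ (arr : List Int), Dom_chocolates arr → Pre_chocolates arr → Spec_chocolates arr (chocolates arr)

-- ===== LEMMAS AND PROOFS =====

-- running minimum (B's fold)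
def fmin (m : Int) (l : List Int) : Int :=
  l.foldl (fun a y => if y < a then y else a) m

lemma fmin_le_init (l : List Int) : ∀ m : Int, fmin m l ≤ m := by
  induction l with
  | nil => intro m; simp [fmin]
  | cons y ys ih =>
    intro m
    simp only [fmin, List.foldl_cons]
    by_cases h : y < m
    · simp only [if_pos h]; exact le_trans (ih y) (le_of_lt h)
    · simp only [if_neg h]; exact ih m

lemma fmin_append_single (m z : Int) (l : List Int) :
    fmin m (l ++ [z]) = if z < fmin m l then z else fmin m l := by
  simp [fmin, List.foldl_append]

-- dropping a non-minimal seed: if some element beats m, the seed m is irrelevant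
lemma fmin_drop_head (ys : List Int) : ∀ (y m : Int),
    (∃ x ∈ y :: ys, x < m) → fmin m (y :: ys) = fmin y ys := by
  induction ys with
  | nil =>
    intro y m ⟨x, hx, hlt⟩
    simp only [List.mem_singleton] at hx
    subst hx
    simp [fmin, if_pos hlt]
  | cons z zs ih =>
    intro y m hex
    by_cases h : y < m
    · simp [fmin, if_pos h]
    · obtain ⟨x, hx, hlt⟩ := hex
      have hxz : x ∈ z :: zs := by
        rcases List.mem_cons.mp hx with rfl | h'
        · exact absurd hlt h
        · exact h'
      have h1 : fmin m (z :: zs) = fmin z zs := ih z m ⟨x, hxz, hlt⟩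
      have h2 : fmin y (z :: zs) = fmin z zs :=
        ih z y ⟨x, hxz, lt_of_lt_of_le hlt (le_of_not_gt h)⟩
      simp only [fmin, List.foldl_cons] at *
      rw [if_neg h]
      rw [show (if z < m then z else m) = _ from rfl] at h1
      rw [h1, ← h2]

-- the loop computes the running minimum of arr[s..e]
lemma chocLoop_eq (n : Nat) : ∀ (arr : List Int) (s e : Int),
    (e - s).toNat = n → 0 ≤ s → s ≤ e → e < arr.length →
    chocLoop arr n s e =
      fmin (arr.getD s.toNat 0) ((arr.drop (s.toNat + 1)).take (e - s).toNat) := by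
  induction n with
  | zero =>
    intro arr s e hn hs hse he
    have : s = e := by omega
    subst this
    simp only [chocLoop]
    rw [PySem.List.pyGet?_of_nonneg arr hs]
    simp [fmin, List.getD]
  | succ n ih =>
    intro arr s e hn hs hse he
    have hslt : s < e := by omega
    have hsr : s.toNat < arr.length := by omega
    have her : e.toNat < arr.length := by omega
    have hget : ∀ i : Int, 0 ≤ i → i < arr.length →
        (PySem.List.pyGet? arr i).getD 0 = arr.getD i.toNat 0 := by
      intro i h0 hl
      rw [PySem.List.pyGet?_of_nonneg arr h0]
      simp [List.getD]
    -- the slice arr[s+1..e]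
    have hlen_drop : (arr.drop (s.toNat + 1)).length = arr.length - (s.toNat + 1) :=
      List.length_drop
    have hslice : (arr.drop (s.toNat + 1)).take (e - s).toNat
        = arr.getD (s.toNat + 1) 0 :: (arr.drop (s.toNat + 2)).take (e - s - 1).toNat := by
      have h1 : s.toNat + 1 < arr.length := by omega
      rw [List.drop_eq_getElem_cons h1]
      have : (e - s).toNat = (e - s - 1).toNat + 1 := by omega
      rw [this, List.take_succ_cons]
      simp [List.getD, List.getElem?_eq_getElem h1]
    simp only [chocLoop]
    rw [if_pos hslt]
    rw [hget s hs (by omega), hget e (by omega) he]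
    by_cases hcmp : arr.getD s.toNat 0 > arr.getD e.toNat 0
    · rw [if_pos hcmp]
      have hrec := ih arr (s + 1) e (by omega) (by omega) (by omega) he
      rw [hrec]
      rw [hslice]
      have hs1 : (s + 1).toNat = s.toNat + 1 := by omega
      rw [hs1] at hrec ⊢
      -- arr[e] is in the slice arr[s+1..e] and is < arr[s]
      have hmem : arr.getD e.toNat 0 ∈
          arr.getD (s.toNat + 1) 0 :: (arr.drop (s.toNat + 2)).take (e - s - 1).toNat := by
        rw [← hslice]
        have hidx : (e - s).toNat - 1 < ((arr.drop (s.toNat + 1)).take (e - s).toNat).length := by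
          rw [List.length_take, hlen_drop]; omega
        have heq : s.toNat + 1 + ((e - s).toNat - 1) = e.toNat := by omega
        have : ((arr.drop (s.toNat + 1)).take (e - s).toNat)[(e - s).toNat - 1]'hidx
            = arr.getD e.toNat 0 := by
          simp [List.getElem_take, List.getElem_drop, heq, List.getD,
            List.getElem?_eq_getElem her]
        rw [← this]
        exact List.getElem_mem hidx
      rw [fmin_drop_head _ _ _ ⟨arr.getD e.toNat 0, hmem, hcmp⟩]
      have : (e - (s + 1)).toNat = (e - s - 1).toNat := by omega
      rw [this]
    · rw [if_neg hcmp]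
      have hrec := ih arr s (e - 1) (by omega) hs (by omega) (by omega)
      rw [hrec]
      -- arr[s+1..e] = arr[s+1..e-1] ++ [arr[e]]
      have hsplit : (arr.drop (s.toNat + 1)).take (e - s).toNat
          = (arr.drop (s.toNat + 1)).take (e - 1 - s).toNat ++ [arr.getD e.toNat 0] := by
        have h1 : (e - s).toNat = (e - 1 - s).toNat + 1 := by omega
        rw [h1, List.take_add_one]
        congr 1
        have hidx : (e - 1 - s).toNat < (arr.drop (s.toNat + 1)).length := by
          rw [hlen_drop]; omega
        rw [List.getElem?_eq_getElem hidx]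
        have heq : s.toNat + 1 + (e - 1 - s).toNat = e.toNat := by omega
        simp [List.getElem_drop, heq, List.getD, List.getElem?_eq_getElem her]
      rw [hsplit, fmin_append_single]
      have hle : fmin (arr.getD s.toNat 0) ((arr.drop (s.toNat + 1)).take (e - 1 - s).toNat)
          ≤ arr.getD e.toNat 0 :=
        le_trans (fmin_le_init _ _) (le_of_not_gt hcmp)
      rw [if_neg (not_lt_of_ge hle)]

-- ===== VERDICT (by name: the statement is the Claim_ definition above) =====
theorem chocolates_spec : Claim_equal_chocolates := by
  intro arr _ hpre
  unfold Spec_chocolates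
  obtain ⟨x, xs, rfl⟩ := List.exists_cons_of_ne_nil hpre
  unfold chocolates
  have hlen : PySem.List.len (x :: xs) = (x :: xs).length := PySem.List.len_eq _
  rw [hlen]
  have hfuel : (((x :: xs).length : Int) - 1).toNat = (((x :: xs).length : Int) - 1 - 0).toNat := by
    omega
  rw [hfuel]
  have h := chocLoop_eq (((x :: xs).length : Int) - 1 - 0).toNat (x :: xs) 0
      ((x :: xs).length - 1) rfl (by omega) (by simp) (by simp)
  rw [h]
  have h1 : (((x :: xs).length : Int) - 1 - 0).toNat = xs.length := by simp
  rw [h1]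
  have h2 : ((x :: xs).drop ((0 : Int).toNat + 1)).take xs.length = xs := by simp
  rw [h2]
  -- B's side: fold over x :: xs starting at x; first step is a no-op
  unfold chocolates_alt
  rw [PySem.List.pyGet?_zero_cons]
  simp only [Option.getD_some, List.foldl_cons, lt_irrefl]
  rfl
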